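-- pv_equiv track=rewrite | github.com/syedaliabbas1/Tableau | test7.py | find_connective_index
-- ===== SOURCE A (Python) =====
-- def find_connective_index(fmla):
--     depth = 0
--     for i in range(len(fmla)):
--         if fmla[i] == '(':
--             depth += 1
--         elif fmla[i] == ')':
--             depth -= 1
--         elif depth == 1 and fmla[i:i+2] in ['/\\', '\\/', '=>']:
--             return i
--     return None
-- ===== SOURCE B (Python) =====
-- def find_connective_index(fmla):
--     # Pass 1: prefix-depth table; deps[i] = parenthesis depth before index i.
--     deps = [0]
--     for c in fmla:
--         deps.append(deps[-1] + (1 if c == '(' else -1 if c == ')' else 0))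
--     # Pass 2: first position at depth 1 starting a binary connective.
--     conns = {'/\\', '\\/', '=>'}
--     for i in range(len(fmla) - 1):
--         if deps[i] == 1 and fmla[i:i + 2] in conns:
--             return i
--     return None
-- ===== Notes on version B (the rewrite author's own statement) =====
-- stated objective: alternative
-- what changed: Replaces the single stateful loop (depth counter interleaved with connective detection and early return) by two separate passes: first build a prefix parenthesis-depth table, then scan for the first index at depth 1 starting one of the three connectives.
import Mathlib
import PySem

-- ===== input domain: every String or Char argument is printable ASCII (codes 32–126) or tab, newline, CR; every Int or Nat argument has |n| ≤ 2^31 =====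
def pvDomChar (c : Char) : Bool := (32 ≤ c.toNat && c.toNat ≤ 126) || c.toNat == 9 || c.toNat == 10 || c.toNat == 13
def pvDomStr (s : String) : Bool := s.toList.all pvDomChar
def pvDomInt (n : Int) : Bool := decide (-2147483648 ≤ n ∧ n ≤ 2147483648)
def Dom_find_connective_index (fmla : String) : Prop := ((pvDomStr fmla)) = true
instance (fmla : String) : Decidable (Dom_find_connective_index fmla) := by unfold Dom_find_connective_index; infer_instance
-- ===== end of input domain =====

-- B replaces A's single stateful loop by two passes (prefix-depth table, then a scan); same cost, alternative decomposition.

-- ===== PORT A =====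
-- fmla[i:i+2] ∈ ['/\', '\/', '=>'] at the current position: current char + next char (a
-- length-1 slice at the end is never one of the two-char connectives).
def pvIsConnA (c : Char) (rest : List Char) : Bool :=
  match rest.head? with
  | some c2 => (c = '/' && c2 = '\\') || (c = '\\' && c2 = '/') || (c = '=' && c2 = '>')
  | none => false

-- the loop `for i in range(len(fmla))` with the running depth, early return = some i
def pvGoA : List Char → Int → Int → Option Int
  | [], _, _ => none
  | c :: rest, depth, i =>
    if c = '(' then pvGoA rest (depth + 1) (i + 1)
    else if c = ')' then pvGoA rest (depth - 1) (i + 1)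
    else if depth = 1 ∧ pvIsConnA c rest then some i
    else pvGoA rest depth (i + 1)

def find_connective_index (fmla : String) : Option Int :=
  pvGoA fmla.toList 0 0

-- ===== PORT B =====
-- pass 1: deps[i] = parenthesis depth before index i (one forward pass, scanl)
def pvDelta (c : Char) : Int := if c = '(' then 1 else if c = ')' then -1 else 0

def pvDepths (cs : List Char) : List Int :=
  cs.scanl (fun d c => d + pvDelta c) 0

-- the membership test fmla[i:i+2] ∈ conns on the two chars at i, i+1
def pvConn2 (c1 c2 : Char) : Bool :=
  (c1 = '/' && c2 = '\\') || (c1 = '\\' && c2 = '/') || (c1 = '=' && c2 = '>')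

-- pass 2: for i in range(len(fmla)-1): deps[i] == 1 and pair check; first hit wins
def pvScanB : List Int → List Char → Int → Option Int
  | d :: ds, c1 :: c2 :: rest, i =>
    if d = 1 ∧ pvConn2 c1 c2 then some i else pvScanB ds (c2 :: rest) (i + 1)
  | _, _, _ => none

def find_connective_index_alt (fmla : String) : Option Int :=
  pvScanB (pvDepths fmla.toList) fmla.toList 0

-- ===== PRECONDITION & SPEC =====
def Spec_find_connective_index (fmla : String) (out : Option Int) : Prop := out = find_connective_index_alt fmla
instance (fmla : String) (out : Option Int) : Decidable (Spec_find_connective_index fmla out) := by unfold Spec_find_connective_index; infer_instance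

-- ===== CLAIM (what is proved, stated in full; the proofs are below) =====
def Claim_equal_find_connective_index : Prop := ∀ (fmla : String), Dom_find_connective_index fmla → Spec_find_connective_index fmla (find_connective_index fmla)

-- ===== LEMMAS AND PROOFS =====
theorem pvGoA_cons (c : Char) (rest : List Char) (depth i : Int) :
    pvGoA (c :: rest) depth i =
      if c = '(' then pvGoA rest (depth + 1) (i + 1)
      else if c = ')' then pvGoA rest (depth - 1) (i + 1)
      else if depth = 1 ∧ pvIsConnA c rest then some i
      else pvGoA rest depth (i + 1) := rfl

theorem pvScanB_cons (d : Int) (ds : List Int) (c1 c2 : Char) (rest : List Char) (i : Int) :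
    pvScanB (d :: ds) (c1 :: c2 :: rest) i =
      if d = 1 ∧ pvConn2 c1 c2 then some i else pvScanB ds (c2 :: rest) (i + 1) := rfl

theorem pvScanB_short (ds : List Int) (cs : List Char) (i : Int) (h : cs.length ≤ 1) :
    pvScanB ds cs i = none := by
  cases ds <;> cases cs with
  | nil => rfl
  | cons c rest => cases rest <;> simp_all [pvScanB]

theorem pvGoA_eq_scan (cs : List Char) : ∀ (depth i : Int),
    pvGoA cs depth i = pvScanB (cs.scanl (fun d c => d + pvDelta c) depth) cs i := by
  induction cs with
  | nil => intro depth i; simp [pvGoA, pvScanB, List.scanl]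
  | cons c rest ih =>
    intro depth i
    cases rest with
    | nil =>
      rw [pvScanB_short _ _ _ (by simp)]
      rw [pvGoA_cons]
      split_ifs with h1 h2 h3 <;> simp_all [pvGoA, pvIsConnA, pvScanB_short]
    | cons c2 rest2 =>
      rw [List.scanl_cons, pvScanB_cons]
      by_cases h1 : c = '('
      · subst h1
        rw [if_neg (by simp [pvConn2])]
        rw [pvGoA_cons, if_pos rfl]
        simpa [pvDelta] using ih (depth + 1) (i + 1)
      · by_cases h2 : c = ')'
        · subst h2
          rw [if_neg (by simp [pvConn2])]
          rw [pvGoA_cons, if_neg (by decide), if_pos rfl]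
          simpa [pvDelta] using ih (depth - 1) (i + 1)
        · have hdelta : pvDelta c = 0 := by simp [pvDelta, h1, h2]
          have hconn : pvIsConnA c (c2 :: rest2) = pvConn2 c c2 := by
            simp [pvIsConnA, pvConn2, List.head?]
          rw [pvGoA_cons, if_neg h1, if_neg h2, hconn, hdelta, add_zero]
          split_ifs with h3
          · rfl
          · exact ih depth (i + 1)

-- ===== VERDICT (by name: the statement is the Claim_ definition above) =====
theorem find_connective_index_spec : Claim_equal_find_connective_index := by
  intro fmla _
  unfold Spec_find_connective_index find_connective_index find_connective_index_alt pvDepths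
  exact pvGoA_eq_scan fmla.toList 0 0
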